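-- pv_equiv track=rewrite | github.com/NCAR/lrose-core | codebase/make_bin/createMakefile.am.app.lrose.py | decodeLibLine
-- ===== SOURCE A (Python) =====
-- def decodeLibLine(line):
--
--     libs = []
--
--     toks = line.split(' ')
--     for tok in toks:
--         thisTok = tok.strip(" \t\n\r")
--         if (thisTok.find("-l") == 0):
--             libs.append(thisTok[2:]) # strip off '-l'
--         elif ((thisTok.find("NETCDF4_LIBS") >= 0) or
--               (thisTok.find("NETCDF_LIBS") >= 0)):
--             libs.append("netcdf_c++")
--             libs.append("netcdf")
--             libs.append("hdf5_cpp")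
--             libs.append("hdf5_hl")
--             libs.append("hdf5")
--             libs.append("udunits2")
--             libs.append("z")
--             libs.append("bz2")
--         elif (thisTok.find("NETCDF_C_AND_C++_LIBS") >= 0):
--             libs.append("netcdf_c++")
--             libs.append("netcdf")
--         elif (thisTok.find("NETCDF_C_AND_F_LIBS") >= 0):
--             libs.append("netcdff")
--             libs.append("netcdf")
--         elif (thisTok.find("NETCDF_C_LIB") >= 0):
--             libs.append("netcdf")
--         elif (thisTok.find("NETCDF_FF_LIB") >= 0):
--             libs.append("netcdff")
--         elif (thisTok.find("TDRP_LIBS") >= 0):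
--             libs.append("tdrp")
--
--     return libs
-- ===== SOURCE B (Python) =====
-- # Alternative algorithm: instead of a per-token elif chain of substring finds (pattern-major),
-- # classify each token with ONE left-to-right scan over its suffixes, testing all macro patterns
-- # simultaneously and keeping the lowest-priority index found (min-priority = A's elif order).
-- _TRIGGERS = ["NETCDF4_LIBS", "NETCDF_LIBS", "NETCDF_C_AND_C++_LIBS",
--              "NETCDF_C_AND_F_LIBS", "NETCDF_C_LIB", "NETCDF_FF_LIB", "TDRP_LIBS"]
-- _BIG = ["netcdf_c++", "netcdf", "hdf5_cpp", "hdf5_hl", "hdf5", "udunits2", "z", "bz2"]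
-- _EXPANSION = [_BIG, _BIG, ["netcdf_c++", "netcdf"], ["netcdff", "netcdf"],
--               ["netcdf"], ["netcdff"], ["tdrp"]]
--
-- def _classify(tok):
--     best = None
--     suffix = tok
--     while True:
--         for p, trig in enumerate(_TRIGGERS):
--             if suffix.startswith(trig) and (best is None or p < best):
--                 best = p
--         if not suffix:
--             return best
--         suffix = suffix[1:]
--
-- def decodeLibLine(line):
--     libs = []
--     for raw in line.split(' '):
--         tok = raw.strip(" \t\n\r")
--         if tok.startswith("-l"):
--             libs.append(tok[2:])
--         else:
--             p = _classify(tok)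
--             if p is not None:
--                 libs.extend(_EXPANSION[p])
--     return libs
-- ===== Notes on version B (the rewrite author's own statement) =====
-- stated objective: alternative
-- what changed: Replaces A's per-token elif chain of pattern-major substring find() calls by a single left-to-right scan over each token's suffixes that tests all macro patterns simultaneously, keeping the minimum-priority match, then expands it via an indexed table.
import Mathlib
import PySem

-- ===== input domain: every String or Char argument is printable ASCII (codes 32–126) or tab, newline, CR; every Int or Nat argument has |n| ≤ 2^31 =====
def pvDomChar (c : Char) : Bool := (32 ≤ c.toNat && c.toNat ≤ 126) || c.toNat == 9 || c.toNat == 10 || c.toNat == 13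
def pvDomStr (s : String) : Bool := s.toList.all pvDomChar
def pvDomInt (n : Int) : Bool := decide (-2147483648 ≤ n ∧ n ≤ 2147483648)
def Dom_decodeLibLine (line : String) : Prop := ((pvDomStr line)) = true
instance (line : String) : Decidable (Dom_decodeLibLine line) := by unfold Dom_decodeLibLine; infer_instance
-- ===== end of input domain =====

-- B replaces A's per-token elif chain of substring finds by a single suffix scan testing all
-- macro patterns at once, keeping the minimum-priority match (alternative algorithm).

-- ===== PORT A =====
def decodeLibLine (line : String) : List String :=
  let toks := (PySem.Str.split? line " ").getD []
  toks.foldl (fun libs tok =>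
    let thisTok := PySem.Str.stripChars tok " \t\n\r"
    if PySem.Str.find thisTok "-l" = 0 then
      libs ++ [PySem.Str.slice thisTok (some 2) none]
    else if 0 ≤ PySem.Str.find thisTok "NETCDF4_LIBS" ∨ 0 ≤ PySem.Str.find thisTok "NETCDF_LIBS" then
      libs ++ ["netcdf_c++", "netcdf", "hdf5_cpp", "hdf5_hl", "hdf5", "udunits2", "z", "bz2"]
    else if 0 ≤ PySem.Str.find thisTok "NETCDF_C_AND_C++_LIBS" then
      libs ++ ["netcdf_c++", "netcdf"]
    else if 0 ≤ PySem.Str.find thisTok "NETCDF_C_AND_F_LIBS" then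
      libs ++ ["netcdff", "netcdf"]
    else if 0 ≤ PySem.Str.find thisTok "NETCDF_C_LIB" then
      libs ++ ["netcdf"]
    else if 0 ≤ PySem.Str.find thisTok "NETCDF_FF_LIB" then
      libs ++ ["netcdff"]
    else if 0 ≤ PySem.Str.find thisTok "TDRP_LIBS" then
      libs ++ ["tdrp"]
    else libs) []

-- ===== PORT B =====
def pvTrigs : List (Nat × List Char) :=
  [(0, "NETCDF4_LIBS".toList), (1, "NETCDF_LIBS".toList), (2, "NETCDF_C_AND_C++_LIBS".toList),
   (3, "NETCDF_C_AND_F_LIBS".toList), (4, "NETCDF_C_LIB".toList), (5, "NETCDF_FF_LIB".toList),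
   (6, "TDRP_LIBS".toList)]

def pvBig : List String := ["netcdf_c++", "netcdf", "hdf5_cpp", "hdf5_hl", "hdf5", "udunits2", "z", "bz2"]

def pvExpansion : List (List String) :=
  [pvBig, pvBig, ["netcdf_c++", "netcdf"], ["netcdff", "netcdf"], ["netcdf"], ["netcdff"], ["tdrp"]]

-- inner for-loop of _classify: update best with any pattern starting at this suffix
def pvUpd (s : List Char) (best : Option Nat) (pt : Nat × List Char) : Option Nat :=
  if PySem.Chars.startswith s pt.2 && (match best with | none => true | some b => decide (pt.1 < b))
  then some pt.1 else best

-- the while-loop of _classify: walk the suffixes of the token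
def pvScan : List Char → Option Nat → Option Nat
  | [], best => pvTrigs.foldl (pvUpd []) best
  | c :: rest, best => pvScan rest (pvTrigs.foldl (pvUpd (c :: rest)) best)

def pvClassify (tok : String) : Option Nat := pvScan tok.toList none

def decodeLibLine_alt (line : String) : List String :=
  ((PySem.Str.split? line " ").getD []).foldl (fun libs raw =>
    let tok := PySem.Str.stripChars raw " \t\n\r"
    if PySem.Str.startswith tok "-l" then
      libs ++ [PySem.Str.slice tok (some 2) none]
    else
      match pvClassify tok with
      | none => libs
      | some p => libs ++ pvExpansion.getD p []   -- _EXPANSION[p]; exact: pvClassify only yields p < 7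
    ) []

-- ===== PRECONDITION & SPEC =====
def Spec_decodeLibLine (line : String) (out : List String) : Prop := out = decodeLibLine_alt line
instance (line : String) (out : List String) : Decidable (Spec_decodeLibLine line out) := by unfold Spec_decodeLibLine; infer_instance

-- ===== CLAIM (what is proved, stated in full; the proofs are below) =====
def Claim_equal_decodeLibLine : Prop := ∀ (line : String), Dom_decodeLibLine line → Spec_decodeLibLine line (decodeLibLine line)

-- ===== LEMMAS AND PROOFS =====

-- Option-min combinator: the value pvScan's "best" accumulator computes
def pvOmin : Option Nat → Option Nat → Option Nat
  | none, b => b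
  | some a, none => some a
  | some a, some b => some (min a b)

-- priority of the first trigger that occurs ANYWHERE in s
def pvFindInf (s : List Char) : Option Nat :=
  (pvTrigs.find? (fun pt => decide (pt.2 <:+: s))).map Prod.fst

theorem pvOmin_none_left (b : Option Nat) : pvOmin none b = b := rfl

theorem pvOmin_none_right (a : Option Nat) : pvOmin a none = a := by cases a <;> rfl

theorem pvOmin_assoc (a b c : Option Nat) : pvOmin (pvOmin a b) c = pvOmin a (pvOmin b c) := by
  cases a <;> cases b <;> cases c <;> simp [pvOmin, min_assoc]

theorem pvFind_gt {P : Nat × List Char → Bool} {l : List (Nat × List Char)} {k : Nat}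
    (h : ∀ pt ∈ l, k < pt.1) :
    ∀ j, (l.find? P).map Prod.fst = some j → k < j := by
  intro j hj
  obtain ⟨pt, hfind, rfl⟩ : ∃ pt, l.find? P = some pt ∧ pt.1 = j := by
    cases hf : l.find? P with
    | none => simp [hf] at hj
    | some pt => exact ⟨pt, rfl, by simpa [hf] using hj⟩
  exact h _ (List.mem_of_find?_eq_some hfind)

theorem pvOmin_some_of_gt {k : Nat} {r : Option Nat} (h : ∀ j, r = some j → k < j) :
    pvOmin (some k) r = some k ∧ pvOmin r (some k) = some k := by
  cases r with
  | none => simp [pvOmin]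
  | some j =>
    have := h j rfl
    constructor <;> simp [pvOmin] <;> omega

-- the inner fold computes min(best, first prefix-match) on an ascending-priority rule list
theorem pvFoldUpd (s : List Char) :
    ∀ (l : List (Nat × List Char)), l.Pairwise (fun a b => a.1 < b.1) →
    ∀ (best : Option Nat),
      l.foldl (pvUpd s) best
        = pvOmin best ((l.find? (fun pt => PySem.Chars.startswith s pt.2)).map Prod.fst) := by
  intro l
  induction l with
  | nil => intro _ best; simp [pvOmin_none_right]
  | cons hd tl ih =>
    intro hpw best
    obtain ⟨hlt, htl⟩ := List.pairwise_cons.mp hpw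
    by_cases hm : PySem.Chars.startswith s hd.2
    · have hfind : (hd :: tl).find? (fun pt => PySem.Chars.startswith s pt.2) = some hd := by
        simp [hm]
      rw [List.foldl_cons, ih htl, hfind, Option.map_some]
      have hgt := pvFind_gt (P := fun pt => PySem.Chars.startswith s pt.2) hlt
      cases best with
      | none =>
        have hu : pvUpd s none hd = some hd.1 := by simp [pvUpd, hm]
        rw [hu, pvOmin_none_left, (pvOmin_some_of_gt hgt).1]
      | some b =>
        by_cases hb : hd.1 < b
        · have hu : pvUpd s (some b) hd = some hd.1 := by simp [pvUpd, hm, hb]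
          rw [hu, (pvOmin_some_of_gt hgt).1]
          simp [pvOmin]; omega
        · have hu : pvUpd s (some b) hd = some b := by simp [pvUpd, hm, hb]
          rw [hu]
          cases hr : (tl.find? (fun pt => PySem.Chars.startswith s pt.2)).map Prod.fst with
          | none => simp [pvOmin]; omega
          | some j => have := hgt j hr; simp [pvOmin]; omega
    · have hfind : (hd :: tl).find? (fun pt => PySem.Chars.startswith s pt.2)
          = tl.find? (fun pt => PySem.Chars.startswith s pt.2) := by
        simp [hm]
      have hu : pvUpd s best hd = best := by simp [pvUpd, hm]
      rw [List.foldl_cons, hu, hfind]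
      exact ih htl best

-- first-match over "occurs in c :: s" splits into prefix at the head vs occurs in the tail
theorem pvFindSplit (c : Char) (s : List Char) :
    ∀ (l : List (Nat × List Char)), l.Pairwise (fun a b => a.1 < b.1) →
      (l.find? (fun pt => decide (pt.2 <:+: c :: s))).map Prod.fst
        = pvOmin ((l.find? (fun pt => PySem.Chars.startswith (c :: s) pt.2)).map Prod.fst)
                 ((l.find? (fun pt => decide (pt.2 <:+: s))).map Prod.fst) := by
  intro l
  induction l with
  | nil => intro _; simp [pvOmin]
  | cons hd tl ih =>
    intro hpw
    obtain ⟨hlt, htl⟩ := List.pairwise_cons.mp hpw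
    by_cases hp : hd.2 <+: c :: s
    · have hinf : hd.2 <:+: c :: s := hp.isInfix
      have h1 : (hd :: tl).find? (fun pt => decide (pt.2 <:+: c :: s)) = some hd := by
        simp [hinf]
      have h2 : (hd :: tl).find? (fun pt => PySem.Chars.startswith (c :: s) pt.2) = some hd := by
        simp [PySem.Chars.startswith_iff, hp]
      rw [h1, h2]
      simp only [Option.map_some]
      by_cases hq : hd.2 <:+: s
      · have h3 : (hd :: tl).find? (fun pt => decide (pt.2 <:+: s)) = some hd := by
          simp [hq]
        rw [h3, Option.map_some]
        simp [pvOmin]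
      · have h3 : (hd :: tl).find? (fun pt => decide (pt.2 <:+: s))
            = tl.find? (fun pt => decide (pt.2 <:+: s)) := by
          simp [hq]
        rw [h3]
        exact ((pvOmin_some_of_gt (pvFind_gt hlt)).1).symm
    · have hsw : PySem.Chars.startswith (c :: s) hd.2 = false := by
        rw [Bool.eq_false_iff]
        intro h
        exact hp ((PySem.Chars.startswith_iff _ _).mp h)
      have h2 : (hd :: tl).find? (fun pt => PySem.Chars.startswith (c :: s) pt.2)
          = tl.find? (fun pt => PySem.Chars.startswith (c :: s) pt.2) := by
        simp [hsw]
      by_cases hq : hd.2 <:+: s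
      · have hinf : hd.2 <:+: c :: s := List.infix_cons_iff.mpr (Or.inr hq)
        have h1 : (hd :: tl).find? (fun pt => decide (pt.2 <:+: c :: s)) = some hd := by
          simp [hinf]
        have h3 : (hd :: tl).find? (fun pt => decide (pt.2 <:+: s)) = some hd := by
          simp [hq]
        rw [h1, h3, h2]
        simp only [Option.map_some]
        exact ((pvOmin_some_of_gt (pvFind_gt hlt)).2).symm
      · have hninf : ¬ hd.2 <:+: c :: s := fun h => (List.infix_cons_iff.mp h).elim hp hq
        have h1 : (hd :: tl).find? (fun pt => decide (pt.2 <:+: c :: s))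
            = tl.find? (fun pt => decide (pt.2 <:+: c :: s)) := by
          simp [hninf]
        have h3 : (hd :: tl).find? (fun pt => decide (pt.2 <:+: s))
            = tl.find? (fun pt => decide (pt.2 <:+: s)) := by
          simp [hq]
        rw [h1, h3, h2]
        exact ih htl

theorem pvTrigs_pairwise : pvTrigs.Pairwise (fun a b => a.1 < b.1) := by decide

theorem pvScan_eq : ∀ (s : List Char) (best : Option Nat),
    pvScan s best = pvOmin best (pvFindInf s) := by
  intro s
  induction s with
  | nil =>
    intro best
    have h1 : pvFindInf [] = none := by decide
    have h2 : (pvTrigs.find? (fun pt => PySem.Chars.startswith [] pt.2)).map Prod.fst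
        = (none : Option Nat) := by decide
    simp only [pvScan, pvFoldUpd [] pvTrigs pvTrigs_pairwise, h1, h2, pvOmin_none_right]
  | cons c rest ih =>
    intro best
    simp only [pvScan, pvFoldUpd (c :: rest) pvTrigs pvTrigs_pairwise, ih, pvOmin_assoc,
      pvFindInf]
    rw [← pvFindSplit c rest pvTrigs pvTrigs_pairwise]

-- reused condition bridges (A's find-based tests vs prefix/infix propositions)
theorem pvFind_eq_zero_iff (s p : List Char) :
    PySem.Chars.find s p = 0 ↔ p <+: s := by
  constructor
  · intro h
    have h0 : 0 ≤ PySem.Chars.find s p := by omega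
    have := (PySem.Chars.find_spec h0).1
    simpa [h] using this
  · intro hp
    have h0 : 0 ≤ PySem.Chars.find s p := (PySem.Chars.find_nonneg_iff _ _).mpr hp.isInfix
    by_contra hne
    have hpos : 0 < (PySem.Chars.find s p).toNat := by omega
    exact (PySem.Chars.find_spec h0).2 0 hpos (by simpa using hp)

theorem pvCond1 (t : String) :
    (PySem.Str.find t "-l" = 0) ↔ (PySem.Str.startswith t "-l" = true) := by
  simp [pvFind_eq_zero_iff, PySem.Chars.startswith_iff]

theorem pvCond2 (t sub : String) :
    (0 ≤ PySem.Str.find t sub) ↔ sub.toList <:+: t.toList := by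
  simp [PySem.Chars.find_nonneg_iff]

-- explicit evaluation of pvFindInf on the literal rule table
theorem pvFindInf_eval (s : List Char) :
    pvFindInf s =
      if "NETCDF4_LIBS".toList <:+: s then some 0
      else if "NETCDF_LIBS".toList <:+: s then some 1
      else if "NETCDF_C_AND_C++_LIBS".toList <:+: s then some 2
      else if "NETCDF_C_AND_F_LIBS".toList <:+: s then some 3
      else if "NETCDF_C_LIB".toList <:+: s then some 4
      else if "NETCDF_FF_LIB".toList <:+: s then some 5
      else if "TDRP_LIBS".toList <:+: s then some 6
      else none := by
  unfold pvFindInf pvTrigs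
  split_ifs <;> simp_all [List.find?_nil]

-- per-token: A's elif chain equals B's min-priority classification + table lookup
theorem pvTok_eq (libs : List String) (t : String) :
    (if PySem.Str.find t "-l" = 0 then
      libs ++ [PySem.Str.slice t (some 2) none]
    else if 0 ≤ PySem.Str.find t "NETCDF4_LIBS" ∨ 0 ≤ PySem.Str.find t "NETCDF_LIBS" then
      libs ++ ["netcdf_c++", "netcdf", "hdf5_cpp", "hdf5_hl", "hdf5", "udunits2", "z", "bz2"]
    else if 0 ≤ PySem.Str.find t "NETCDF_C_AND_C++_LIBS" then
      libs ++ ["netcdf_c++", "netcdf"]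
    else if 0 ≤ PySem.Str.find t "NETCDF_C_AND_F_LIBS" then
      libs ++ ["netcdff", "netcdf"]
    else if 0 ≤ PySem.Str.find t "NETCDF_C_LIB" then
      libs ++ ["netcdf"]
    else if 0 ≤ PySem.Str.find t "NETCDF_FF_LIB" then
      libs ++ ["netcdff"]
    else if 0 ≤ PySem.Str.find t "TDRP_LIBS" then
      libs ++ ["tdrp"]
    else libs)
    = (if PySem.Str.startswith t "-l" then
        libs ++ [PySem.Str.slice t (some 2) none]
      else
        match pvClassify t with
        | none => libs
        | some p => libs ++ pvExpansion.getD p []) := by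
  have hcls : pvClassify t = pvFindInf t.toList := by
    simp only [pvClassify, pvScan_eq, pvOmin_none_left]
  by_cases hl : PySem.Str.startswith t "-l"
  · rw [if_pos ((pvCond1 t).mpr hl), if_pos hl]
  · rw [if_neg (fun h => hl ((pvCond1 t).mp h)), if_neg hl, hcls, pvFindInf_eval]
    simp only [pvCond2]
    split_ifs <;> simp_all [pvExpansion, pvBig]

-- ===== VERDICT (by name: the statement is the Claim_ definition above) =====
theorem decodeLibLine_spec : Claim_equal_decodeLibLine := by
  intro line _
  unfold Spec_decodeLibLine decodeLibLine decodeLibLine_alt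
  apply List.foldl_ext
  intro libs raw _
  exact pvTok_eq libs (PySem.Str.stripChars raw " \t\n\r")
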